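-- pv_equiv track=rewrite | github.com/matthewkerr/build-a-dog | seeder/fix_breed_data.py | determine_good_with_pets
-- ===== SOURCE A (Python) =====
-- def determine_good_with_pets(temperament: str, demeanor_category: str) -> bool:
--     """Determine if breed is good with other pets."""
--     pet_friendly_traits = [
--         'social', 'friendly', 'gentle', 'tolerant', 'easy-going',
--         'peaceful', 'good-natured'
--     ]
--
--     pet_unfriendly_traits = [
--         'dominant', 'territorial', 'aggressive', 'prey drive',
--         'hunting', 'chasing', 'protective'
--     ]
--
--     temp_lower = temperament.lower()
--     demeanor_lower = demeanor_category.lower()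
--
--     friendly_score = sum(1 for trait in pet_friendly_traits if trait in temp_lower or trait in demeanor_lower)
--     unfriendly_score = sum(1 for trait in pet_unfriendly_traits if trait in temp_lower or trait in demeanor_lower)
--
--     return friendly_score > unfriendly_score
-- ===== SOURCE B (Python) =====
-- def _scan(text, by_first, matched):
--     """Text-driven scan: at every position of text, try only the traits whose
--     first character occurs there, and record those that match."""
--     for j, ch in enumerate(text):
--         for trait in by_first.get(ch, []):
--             if text.startswith(trait, j):
--                 matched.add(trait)
--
--
-- def determine_good_with_pets(temperament: str, demeanor_category: str) -> bool:
--     """Determine if breed is good with other pets."""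
--     friendly = [
--         'social', 'friendly', 'gentle', 'tolerant', 'easy-going',
--         'peaceful', 'good-natured'
--     ]
--     unfriendly = [
--         'dominant', 'territorial', 'aggressive', 'prey drive',
--         'hunting', 'chasing', 'protective'
--     ]
--     by_first = {}
--     for trait in friendly + unfriendly:
--         by_first.setdefault(trait[0], []).append(trait)
--     matched = set()
--     _scan(temperament.lower(), by_first, matched)
--     _scan(demeanor_category.lower(), by_first, matched)
--     good = sum(1 for t in friendly if t in matched)
--     bad = sum(1 for t in unfriendly if t in matched)
--     return good > bad
-- ===== Notes on version B (the rewrite author's own statement) =====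
-- stated objective: alternative
-- what changed: Instead of testing each trait for substring containment, B builds a first-character index of the traits and makes a text-driven scan: at every position of each lowered string it tries only the traits indexed under the character there, collects the matches in a set, and then compares how many friendly vs unfriendly traits were matched.
import Mathlib
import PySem

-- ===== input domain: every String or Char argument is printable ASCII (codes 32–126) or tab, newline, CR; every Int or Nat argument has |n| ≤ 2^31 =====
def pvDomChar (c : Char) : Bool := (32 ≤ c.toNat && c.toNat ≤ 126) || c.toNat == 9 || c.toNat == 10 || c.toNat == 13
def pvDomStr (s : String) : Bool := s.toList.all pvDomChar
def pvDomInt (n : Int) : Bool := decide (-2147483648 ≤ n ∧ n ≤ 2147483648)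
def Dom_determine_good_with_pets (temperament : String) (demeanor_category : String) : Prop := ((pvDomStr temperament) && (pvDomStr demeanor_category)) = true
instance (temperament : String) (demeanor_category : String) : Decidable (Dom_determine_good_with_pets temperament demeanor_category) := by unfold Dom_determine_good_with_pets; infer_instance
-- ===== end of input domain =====

-- B replaces A's per-trait substring tests by a text-driven scan: it walks the positions of
-- each lowered string, tries at each position only the traits indexed under the character
-- found there, and collects the matched traits in a set before comparing the two counts
-- (objective: alternative traversal, same result).

-- ===== PORT A =====
def determine_good_with_pets (temperament : String) (demeanor_category : String) : Bool :=
  let pet_friendly_traits : List String :=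
    ["social", "friendly", "gentle", "tolerant", "easy-going", "peaceful", "good-natured"]
  let pet_unfriendly_traits : List String :=
    ["dominant", "territorial", "aggressive", "prey drive", "hunting", "chasing", "protective"]
  let temp_lower := PySem.Str.lower temperament
  let demeanor_lower := PySem.Str.lower demeanor_category
  let friendly_score : Int := pet_friendly_traits.foldl
    (fun acc trait => if PySem.Str.isIn trait temp_lower || PySem.Str.isIn trait demeanor_lower then acc + 1 else acc) 0
  let unfriendly_score : Int := pet_unfriendly_traits.foldl
    (fun acc trait => if PySem.Str.isIn trait temp_lower || PySem.Str.isIn trait demeanor_lower then acc + 1 else acc) 0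
  decide (friendly_score > unfriendly_score)

-- ===== PORT B =====
-- helper _scan from Source B; 'text.startswith(trait, j)' has no PySem primitive and is ported
-- by hand as startswith on the slice text[j:], exact for the indices 0 ≤ j < len(text) that
-- enumerate(text) yields
def pvScan (text : String) (by_first : PySem.Dict Char (List String))
    (matched : PySem.Set String) : PySem.Set String :=
  (PySem.List.enumerate text.toList).foldl
    (fun m p =>
      (PySem.Dict.getD by_first p.2 []).foldl
        (fun m trait =>
          if PySem.Str.startswith (PySem.Str.slice text (some p.1) none) trait then
            PySem.Set.add m trait
          else m) m)
    matched

def determine_good_with_pets_alt (temperament : String) (demeanor_category : String) : Bool :=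
  let friendly : List String :=
    ["social", "friendly", "gentle", "tolerant", "easy-going", "peaceful", "good-natured"]
  let unfriendly : List String :=
    ["dominant", "territorial", "aggressive", "prey drive", "hunting", "chasing", "protective"]
  -- by_first.setdefault(trait[0], []).append(trait):  trait[0] on the non-empty literal
  -- traits is ported as headD; the in-place append is d.insert of the extended list
  let by_first : PySem.Dict Char (List String) :=
    (friendly ++ unfriendly).foldl
      (fun d trait =>
        PySem.Dict.insert d (trait.toList.headD ' ')
          (PySem.Dict.getD d (trait.toList.headD ' ') [] ++ [trait]))
      PySem.Dict.empty
  let matched := pvScan (PySem.Str.lower demeanor_category) by_first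
    (pvScan (PySem.Str.lower temperament) by_first PySem.Set.empty)
  let good : Int := friendly.foldl
    (fun acc t => if PySem.Set.contains matched t then acc + 1 else acc) 0
  let bad : Int := unfriendly.foldl
    (fun acc t => if PySem.Set.contains matched t then acc + 1 else acc) 0
  decide (good > bad)

-- ===== PRECONDITION & SPEC =====
def Spec_determine_good_with_pets (temperament : String) (demeanor_category : String) (out : Bool) : Prop := out = determine_good_with_pets_alt temperament demeanor_category
instance (temperament : String) (demeanor_category : String) (out : Bool) : Decidable (Spec_determine_good_with_pets temperament demeanor_category out) := by unfold Spec_determine_good_with_pets; infer_instance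

-- ===== CLAIM (what is proved, stated in full; the proofs are below) =====
def Claim_equal_determine_good_with_pets : Prop := ∀ (temperament : String) (demeanor_category : String), Dom_determine_good_with_pets temperament demeanor_category → Spec_determine_good_with_pets temperament demeanor_category (determine_good_with_pets temperament demeanor_category)

-- ===== LEMMAS AND PROOFS =====

-- membership in the inner fold (over a candidate list) adding under a condition
theorem mem_foldl_add_ite (c : String → Bool) (cands : List String)
    (m : PySem.Set String) (t : String) :
    t ∈ cands.foldl (fun m tr => if c tr then PySem.Set.add m tr else m) m
      ↔ t ∈ m ∨ (t ∈ cands ∧ c t = true) := by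
  induction cands generalizing m with
  | nil => simp
  | cons x xs ih =>
    simp only [List.foldl_cons, ih]
    by_cases h : c x = true
    · simp only [h, if_pos, PySem.Set.mem_add, List.mem_cons]
      constructor
      · rintro (⟨hm | rfl⟩ | ⟨hx, hc⟩)
        · exact Or.inl hm
        · exact Or.inr ⟨Or.inl rfl, h⟩
        · exact Or.inr ⟨Or.inr hx, hc⟩
      · rintro (hm | ⟨(rfl | hx), hc⟩)
        · exact Or.inl (Or.inl hm)
        · exact Or.inl (Or.inr rfl)
        · exact Or.inr ⟨hx, hc⟩
    · simp only [h, List.mem_cons]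
      constructor
      · rintro (hm | ⟨hx, hc⟩)
        · exact Or.inl hm
        · exact Or.inr ⟨Or.inr hx, hc⟩
      · rintro (hm | ⟨(rfl | hx), hc⟩)
        · exact Or.inl hm
        · exact absurd hc h
        · exact Or.inr ⟨hx, hc⟩

-- membership in a fold over any list of (position, char) pairs, with per-pair candidates
theorem mem_foldl_pairs (cond : Int → String → Bool) (f : Int × Char → List String)
    (ps : List (Int × Char)) (m : PySem.Set String) (t : String) :
    t ∈ ps.foldl (fun m p =>
        (f p).foldl (fun m tr => if cond p.1 tr then PySem.Set.add m tr else m) m) m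
      ↔ t ∈ m ∨ ∃ p ∈ ps, t ∈ f p ∧ cond p.1 t = true := by
  induction ps generalizing m with
  | nil => simp
  | cons p ps ih =>
    simp only [List.foldl_cons, ih, mem_foldl_add_ite]
    constructor
    · rintro ((hm | ⟨ht, hc⟩) | ⟨q, hq, ht, hc⟩)
      · exact Or.inl hm
      · exact Or.inr ⟨p, List.mem_cons_self, ht, hc⟩
      · exact Or.inr ⟨q, List.mem_cons_of_mem _ hq, ht, hc⟩
    · rintro (hm | ⟨q, hq, ht, hc⟩)
      · exact Or.inl (Or.inl hm)
      · rcases List.mem_cons.mp hq with rfl | hq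
        · exact Or.inl (Or.inr ⟨ht, hc⟩)
        · exact Or.inr ⟨q, hq, ht, hc⟩

-- position-driven prefix matching finds exactly the substrings (for a non-empty pattern)
theorem exists_pos_startswith_iff (text t : String) (ht : t.toList ≠ []) :
    (∃ j ∈ PySem.List.pyRange 0 (PySem.Str.len text) 1,
        PySem.Str.startswith (PySem.Str.slice text (some j) none) t = true)
      ↔ PySem.Str.isIn t text = true := by
  have hiff : PySem.Str.isIn t text = true ↔ ∃ j, t.toList <+: text.toList.drop j := by
    rw [PySem.Str.isIn_iff_infix, ← PySem.Chars.isIn_iff_infix,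
        ← PySem.Chars.exists_prefix_drop_iff_isIn]
  constructor
  · rintro ⟨j, hj, hsw⟩
    rcases PySem.List.mem_pyRange_one.mp hj with ⟨hj0, _⟩
    have hp := (PySem.Chars.startswith_iff _ _).mp (by simpa using hsw)
    refine hiff.mpr ⟨j.toNat, ?_⟩
    simpa [PySem.List.slice_from _ hj0] using hp
  · intro hin
    rcases hiff.mp hin with ⟨j, hpre⟩
    have hjlt : j < text.toList.length := by
      by_contra h
      rw [List.drop_eq_nil_of_le (by omega)] at hpre
      exact ht (List.prefix_nil.mp hpre)
    refine ⟨(j : Int), ?_, ?_⟩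
    · rw [PySem.List.mem_pyRange_one]
      have hlen : PySem.Str.len text = (text.toList.length : Int) := by
        simp [PySem.Str.len]
      rw [hlen]
      omega
    · have hsw := (PySem.Chars.startswith_iff (text.toList.drop j) t.toList).mpr hpre
      simpa [PySem.List.slice_from_natCast] using hsw

-- a trait that starts at position j must begin with the character at position j
theorem head_of_prefix_drop (l cs : List Char) (j : Nat) (hcs : cs ≠ [])
    (_hj : j < l.length) (hpre : cs <+: l.drop j) :
    PySem.List.pyGetD l (j : Int) ' ' = cs.headD ' ' := by
  rcases hpre with ⟨r, hr⟩
  rcases cs with _ | ⟨c, cs'⟩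
  · exact absurd rfl hcs
  · rw [PySem.List.pyGetD_of_nonneg _ _ (Int.natCast_nonneg j)]
    simp only [Int.toNat_natCast]
    rw [List.getD_eq_getElem?_getD, ← List.head?_drop, ← hr]
    simp

-- characterisation of the matched set after scanning one text:
-- hB says every trait of interest is indexed under its own first character
theorem mem_pvScan (text : String) (bf : PySem.Dict Char (List String))
    (m : PySem.Set String) (t : String) (ht : t.toList ≠ [])
    (hB : t ∈ PySem.Dict.getD bf (t.toList.headD ' ') []) :
    t ∈ pvScan text bf m ↔ t ∈ m ∨ PySem.Str.isIn t text = true := by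
  unfold pvScan
  rw [mem_foldl_pairs
    (fun j tr => PySem.Str.startswith (PySem.Str.slice text (some j) none) tr)
    (fun p => PySem.Dict.getD bf p.2 [])]
  have henum : PySem.List.enumerate text.toList 0
      = (PySem.List.pyRange 0 (PySem.List.len text.toList) 1).map
          (fun j => (j, PySem.List.pyGetD text.toList j ' ')) :=
    PySem.List.enumerate_eq_map_pyRange text.toList ' '
  constructor
  · rintro (hm | ⟨p, hp, _, hc⟩)
    · exact Or.inl hm
    · rw [henum, List.mem_map] at hp
      rcases hp with ⟨j, hj, rfl⟩
      refine Or.inr ((exists_pos_startswith_iff text t ht).mp ⟨j, ?_, hc⟩)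
      simpa [PySem.Str.len, PySem.Chars.len, PySem.List.len] using hj
  · rintro (hm | hin)
    · exact Or.inl hm
    · rcases (exists_pos_startswith_iff text t ht).mpr hin with ⟨j, hj, hsw⟩
      rcases PySem.List.mem_pyRange_one.mp hj with ⟨hj0, hjlt⟩
      have hjlt' : j.toNat < text.toList.length := by
        simp only [PySem.Str.len] at hjlt
        omega
      have hpre : t.toList <+: text.toList.drop j.toNat := by
        have := (PySem.Chars.startswith_iff _ _).mp (by simpa using hsw)
        simpa [PySem.List.slice_from _ hj0] using this
      have hch : PySem.List.pyGetD text.toList (j.toNat : Int) ' ' = t.toList.headD ' ' :=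
        head_of_prefix_drop _ _ _ ht hjlt' hpre
      have hj' : j = (j.toNat : Int) := by omega
      refine Or.inr ⟨(j, PySem.List.pyGetD text.toList j ' '), ?_, ?_, hsw⟩
      · rw [henum, List.mem_map]
        exact ⟨j, by simpa [PySem.Str.len, PySem.Chars.len, PySem.List.len] using hj, rfl⟩
      · show t ∈ PySem.Dict.getD bf (PySem.List.pyGetD text.toList j ' ') []
        rw [hj', hch]
        exact hB

-- ===== VERDICT (by name: the statement is the Claim_ definition above) =====
theorem determine_good_with_pets_spec : Claim_equal_determine_good_with_pets := by
  intro temperament demeanor_category _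
  unfold Spec_determine_good_with_pets determine_good_with_pets determine_good_with_pets_alt
  set l1 := PySem.Str.lower temperament with hl1
  set l2 := PySem.Str.lower demeanor_category with hl2
  set friendly : List String :=
    ["social", "friendly", "gentle", "tolerant", "easy-going", "peaceful", "good-natured"]
    with hf
  set unfriendly : List String :=
    ["dominant", "territorial", "aggressive", "prey drive", "hunting", "chasing", "protective"]
    with hu
  set bf : PySem.Dict Char (List String) :=
    (friendly ++ unfriendly).foldl
      (fun d trait =>
        PySem.Dict.insert d (trait.toList.headD ' ')
          (PySem.Dict.getD d (trait.toList.headD ' ') [] ++ [trait]))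
      PySem.Dict.empty
    with hbf
  have hmem : ∀ t ∈ friendly ++ unfriendly,
      PySem.Set.contains (pvScan l2 bf (pvScan l1 bf PySem.Set.empty)) t
        = (PySem.Str.isIn t l1 || PySem.Str.isIn t l2) := by
    intro t htr
    have ht : t.toList ≠ [] := by
      rw [hf, hu] at htr; fin_cases htr <;> decide
    have hB : t ∈ PySem.Dict.getD bf (t.toList.headD ' ') [] := by
      rw [hf, hu] at htr; rw [hbf, hf, hu]; fin_cases htr <;> decide
    rw [Bool.eq_iff_iff, PySem.Set.contains_iff,
        mem_pvScan l2 bf _ t ht hB, mem_pvScan l1 bf _ t ht hB]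
    simp only [PySem.Set.empty, List.not_mem_nil, false_or, Bool.or_eq_true]
  have hfold : ∀ (l : List String), (∀ t ∈ l, t ∈ friendly ++ unfriendly) →
      l.foldl (fun acc t => if PySem.Set.contains (pvScan l2 bf (pvScan l1 bf PySem.Set.empty)) t
          then acc + 1 else acc) (0 : Int)
        = l.foldl (fun acc t =>
            if PySem.Str.isIn t l1 || PySem.Str.isIn t l2 then acc + 1 else acc) 0 := by
    intro l hl
    apply PySem.List.foldl_congr_mem
    intro acc x hx
    rw [hmem x (hl x hx)]
  show decide (friendly.foldl
        (fun acc trait => if PySem.Str.isIn trait l1 || PySem.Str.isIn trait l2 then acc + 1 else acc) (0 : Int)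
      > unfriendly.foldl
        (fun acc trait => if PySem.Str.isIn trait l1 || PySem.Str.isIn trait l2 then acc + 1 else acc) (0 : Int))
    = decide (friendly.foldl
        (fun acc t => if PySem.Set.contains (pvScan l2 bf (pvScan l1 bf PySem.Set.empty)) t then acc + 1 else acc) (0 : Int)
      > unfriendly.foldl
        (fun acc t => if PySem.Set.contains (pvScan l2 bf (pvScan l1 bf PySem.Set.empty)) t then acc + 1 else acc) (0 : Int))
  rw [hfold friendly (fun t ht => List.mem_append_left _ ht),
      hfold unfriendly (fun t ht => List.mem_append_right _ ht)]
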